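-- pv_equiv track=rewrite | github.com/nmud19/Play_with_excel_python | df_result.py | BS_month_index
-- ===== SOURCE A (Python) =====
-- def BS_month_index(month):
-- 	i = 9
-- 	li = []
-- 	x = month
-- 	start = 0
-- 	while(start < x):
-- 		if(i > 12 ):
-- 			i = 1
-- 		li = li + [i]
-- 		i+=1
-- 		start+=1
-- 	return li
-- ===== SOURCE B (Python) =====
-- def BS_month_index(month):
--     base = [9, 10, 11, 12, 1, 2, 3, 4, 5, 6, 7, 8]
--     n = max(month, 0)
--     return (base * (n // 12 + 1))[:n]
-- ===== Notes on version B (the rewrite author's own statement) =====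
-- stated objective: faster
-- what changed: Replaces the counter loop with a conditional wrap branch and quadratic 'li = li + [i]' accumulation by tiling the fixed 12-month period table and truncating it to length max(month,0).
import Mathlib
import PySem

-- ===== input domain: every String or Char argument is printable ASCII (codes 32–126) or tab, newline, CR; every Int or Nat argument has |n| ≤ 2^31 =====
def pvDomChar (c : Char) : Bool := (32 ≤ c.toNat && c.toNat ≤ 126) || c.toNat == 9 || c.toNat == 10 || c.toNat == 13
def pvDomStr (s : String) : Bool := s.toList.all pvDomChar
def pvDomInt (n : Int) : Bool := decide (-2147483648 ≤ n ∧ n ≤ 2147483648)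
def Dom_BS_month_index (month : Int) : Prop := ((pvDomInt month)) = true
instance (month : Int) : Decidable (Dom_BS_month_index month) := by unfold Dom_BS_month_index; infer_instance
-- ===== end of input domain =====

-- ===== PORT A =====
-- while loop of A: accumulator li, counter i, fuel = remaining iterations (x - start)
def pvLoopA (li : List Int) (i : Int) : Nat → List Int
  | 0 => li
  | n+1 =>
    let j := if i > 12 then 1 else i
    pvLoopA (li ++ [j]) (j + 1) n

def BS_month_index (month : Int) : List Int := pvLoopA [] 9 month.toNat

-- ===== PORT B =====
def pvBase : List Int := [9, 10, 11, 12, 1, 2, 3, 4, 5, 6, 7, 8]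

def BS_month_index_alt (month : Int) : List Int :=
  let n := (max month 0).toNat
  ((List.replicate (n / 12 + 1) pvBase).flatten).take n

-- ===== PRECONDITION & SPEC =====
def Spec_BS_month_index (month : Int) (out : List Int) : Prop := out = BS_month_index_alt month
instance (month : Int) (out : List Int) : Decidable (Spec_BS_month_index month out) := by unfold Spec_BS_month_index; infer_instance

-- ===== CLAIM (what is proved, stated in full; the proofs are below) =====
def Claim_equal_BS_month_index : Prop := ∀ (month : Int), Dom_BS_month_index month → Spec_BS_month_index month (BS_month_index month)

-- ===== LEMMAS AND PROOFS =====

-- ===== VERDICT (by name: the statement is the Claim_ definition above) =====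
lemma pvLoopA_acc : ∀ (n : Nat) (li : List Int) (i : Int),
    pvLoopA li i n = li ++ pvLoopA [] i n := by
  intro n
  induction n with
  | zero => intro li i; simp [pvLoopA]
  | succ m ih =>
    intro li i
    simp only [pvLoopA, List.nil_append]
    rw [ih]
    conv_rhs => rw [ih]
    simp

lemma pvLoopA_period (n : Nat) : pvLoopA [] 9 (n + 12) = pvBase ++ pvLoopA [] 9 n := by
  rw [show pvLoopA [] 9 (n + 12) = pvLoopA pvBase 9 n from rfl, pvLoopA_acc]

lemma pvLoopA_closed : ∀ (n : Nat),
    pvLoopA [] 9 n = ((List.replicate (n / 12 + 1) pvBase).flatten).take n := by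
  intro n
  induction n using Nat.strong_induction_on with
  | _ n ih =>
    by_cases h : n < 12
    · interval_cases n <;> rfl
    · obtain ⟨m, rfl⟩ : ∃ m, n = m + 12 := ⟨n - 12, by omega⟩
      rw [pvLoopA_period, ih m (by omega)]
      have hdiv : (m + 12) / 12 = m / 12 + 1 := Nat.add_div_right m (by norm_num)
      rw [hdiv]
      have hlen : pvBase.length = 12 := by decide
      have ht : pvBase.take (m + 12) = pvBase := List.take_of_length_le (by rw [hlen]; omega)
      have key : ((List.replicate (m / 12 + 1 + 1) pvBase).flatten).take (m + 12)
          = pvBase ++ ((List.replicate (m / 12 + 1) pvBase).flatten).take m := by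
        rw [List.replicate_succ, List.flatten_cons, List.take_append, ht, hlen]
        congr 1
      rw [key]

theorem BS_month_index_spec : Claim_equal_BS_month_index := by
  intro month _
  unfold Spec_BS_month_index BS_month_index BS_month_index_alt
  have : (max month 0).toNat = month.toNat := by omega
  rw [this, pvLoopA_closed]
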